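-- pv_equiv track=rewrite | github.com/kuchlous/x-tracer | src/netlist/fast_parser.py | _classify_ports
-- ===== SOURCE A (Python) =====
-- _CLOCK_PORTS = frozenset({"CLK", "CK", "clk", "ck", "clock", "CLOCK", "CLK_N", "CKN"})
--
-- _D_PORTS = frozenset({"D", "d", "DIN", "din", "DATA", "data", "D0", "D1"})
--
-- _Q_PORTS = frozenset({"Q", "q", "QN", "qn", "DOUT", "dout", "Q_N", "Q0", "Q1"})
--
-- _RESET_PORTS = frozenset({"RST", "rst", "RESET", "reset", "RESET_B", "RST_B",
--                 "RESET_N", "RST_N", "RN", "CLR", "clr", "CDN", "R"})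
--
-- _SET_PORTS = frozenset({"SET", "set", "SET_B", "SET_N", "SN", "SDN", "PRE", "pre"})
--
-- def _classify_ports(cell_type: str, port_names: list[str]) -> dict[str, str | None]:
--     result: dict[str, str | None] = {
--         "clock_port": None, "d_port": None, "q_port": None,
--         "reset_port": None, "set_port": None,
--     }
--     for name in port_names:
--         if name in _CLOCK_PORTS:
--             result["clock_port"] = name
--         elif name in _D_PORTS:
--             result["d_port"] = name
--         elif name in _Q_PORTS:
--             result["q_port"] = name
--         elif name in _RESET_PORTS:
--             result["reset_port"] = name
--         elif name in _SET_PORTS: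
--             result["set_port"] = name
--     return result
-- ===== SOURCE B (Python) =====
-- _CLOCK_PORTS = frozenset({"CLK", "CK", "clk", "ck", "clock", "CLOCK", "CLK_N", "CKN"})
-- _D_PORTS = frozenset({"D", "d", "DIN", "din", "DATA", "data", "D0", "D1"})
-- _Q_PORTS = frozenset({"Q", "q", "QN", "qn", "DOUT", "dout", "Q_N", "Q0", "Q1"})
-- _RESET_PORTS = frozenset({"RST", "rst", "RESET", "reset", "RESET_B", "RST_B",
--                 "RESET_N", "RST_N", "RN", "CLR", "clr", "CDN", "R"})
-- _SET_PORTS = frozenset({"SET", "set", "SET_B", "SET_N", "SN", "SDN", "PRE", "pre"})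
--
-- _ROLES = [
--     ("clock_port", _CLOCK_PORTS),
--     ("d_port", _D_PORTS),
--     ("q_port", _Q_PORTS),
--     ("reset_port", _RESET_PORTS),
--     ("set_port", _SET_PORTS),
-- ]
--
-- def _classify_ports(cell_type: str, port_names: list[str]) -> dict[str, str | None]:
--     # the role sets are pairwise disjoint, so each role's answer is simply the
--     # last port name belonging to its set: one reversed scan per role.
--     return {
--         key: next((n for n in reversed(port_names) if n in members), None)
--         for key, members in _ROLES
--     }
-- ===== Notes on version B (the rewrite author's own statement) =====
-- stated objective: idiomatic
-- what changed: A's single stateful pass with an if/elif chain updating a mutable dict is replaced by a dict comprehension doing five independent reversed scans, one per role, each taking the last port name in that role's (pairwise-disjoint) set.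
import Mathlib
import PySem

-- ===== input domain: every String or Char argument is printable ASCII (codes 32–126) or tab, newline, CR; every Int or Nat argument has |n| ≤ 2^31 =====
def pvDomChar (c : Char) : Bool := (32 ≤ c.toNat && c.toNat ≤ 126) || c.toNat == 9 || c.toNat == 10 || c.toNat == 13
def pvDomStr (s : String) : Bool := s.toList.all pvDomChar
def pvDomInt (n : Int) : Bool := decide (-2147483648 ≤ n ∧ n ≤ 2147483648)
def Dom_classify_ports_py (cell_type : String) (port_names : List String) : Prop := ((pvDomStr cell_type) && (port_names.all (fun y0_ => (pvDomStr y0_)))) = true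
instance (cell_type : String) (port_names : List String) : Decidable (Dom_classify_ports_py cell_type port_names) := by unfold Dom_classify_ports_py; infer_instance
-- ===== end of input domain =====

-- B replaces A's single branchy pass by five independent reversed scans, one per role (the role sets are pairwise disjoint); objective: idiomatic.

-- ===== PORT A =====
def pvClockPorts : List String := ["CLK", "CK", "clk", "ck", "clock", "CLOCK", "CLK_N", "CKN"]
def pvDPorts : List String := ["D", "d", "DIN", "din", "DATA", "data", "D0", "D1"]
def pvQPorts : List String := ["Q", "q", "QN", "qn", "DOUT", "dout", "Q_N", "Q0", "Q1"]
def pvResetPorts : List String := ["RST", "rst", "RESET", "reset", "RESET_B", "RST_B", "RESET_N", "RST_N", "RN", "CLR", "clr", "CDN", "R"]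
def pvSetPorts : List String := ["SET", "set", "SET_B", "SET_N", "SN", "SDN", "PRE", "pre"]

def pvStepA (result : PySem.Dict String (Option String)) (name : String) : PySem.Dict String (Option String) :=
  if pvClockPorts.contains name then result.insert "clock_port" (some name)
  else if pvDPorts.contains name then result.insert "d_port" (some name)
  else if pvQPorts.contains name then result.insert "q_port" (some name)
  else if pvResetPorts.contains name then result.insert "reset_port" (some name)
  else if pvSetPorts.contains name then result.insert "set_port" (some name)
  else result

def classify_ports_py (cell_type : String) (port_names : List String) : List (String × Option String) :=
  (port_names.foldl pvStepA
    (PySem.Dict.mk [("clock_port", none), ("d_port", none), ("q_port", none),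
                    ("reset_port", none), ("set_port", none)])).items

-- ===== PORT B =====
-- next((n for n in reversed(port_names) if n in members), None)
def pvLastIn (members : List String) (port_names : List String) : Option String :=
  port_names.reverse.find? (fun n => members.contains n)

def classify_ports_py_alt (cell_type : String) (port_names : List String) : List (String × Option String) :=
  [("clock_port", pvLastIn pvClockPorts port_names),
   ("d_port", pvLastIn pvDPorts port_names),
   ("q_port", pvLastIn pvQPorts port_names),
   ("reset_port", pvLastIn pvResetPorts port_names),
   ("set_port", pvLastIn pvSetPorts port_names)]

-- ===== PRECONDITION & SPEC =====
def Spec_classify_ports_py (cell_type : String) (port_names : List String) (out : List (String × Option String)) : Prop := out = classify_ports_py_alt cell_type port_names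
instance (cell_type : String) (port_names : List String) (out : List (String × Option String)) : Decidable (Spec_classify_ports_py cell_type port_names out) := by unfold Spec_classify_ports_py; infer_instance

-- ===== CLAIM (what is proved, stated in full; the proofs are below) =====
def Claim_equal_classify_ports_py : Prop := ∀ (cell_type : String) (port_names : List String), Dom_classify_ports_py cell_type port_names → Spec_classify_ports_py cell_type port_names (classify_ports_py cell_type port_names)

-- ===== LEMMAS AND PROOFS =====

theorem pv_clock_disj (n : String) (h : n ∈ pvClockPorts) :
    n ∉ pvDPorts ∧ n ∉ pvQPorts ∧ n ∉ pvResetPorts ∧ n ∉ pvSetPorts := by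
  fin_cases h <;> exact ⟨by decide, by decide, by decide, by decide⟩

theorem pv_d_disj (n : String) (h : n ∈ pvDPorts) :
    n ∉ pvQPorts ∧ n ∉ pvResetPorts ∧ n ∉ pvSetPorts := by
  fin_cases h <;> exact ⟨by decide, by decide, by decide⟩

theorem pv_q_disj (n : String) (h : n ∈ pvQPorts) :
    n ∉ pvResetPorts ∧ n ∉ pvSetPorts := by
  fin_cases h <;> exact ⟨by decide, by decide⟩

theorem pv_r_disj (n : String) (h : n ∈ pvResetPorts) : n ∉ pvSetPorts := by
  fin_cases h <;> decide

theorem pv_last_cons (R : List String) (n : String) (t : List String) (x : Option String) :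
    (pvLastIn R (n :: t)).or x =
    (pvLastIn R t).or ((if n ∈ R then some n else none).or x) := by
  by_cases h : n ∈ R <;>
    simp [pvLastIn, List.reverse_cons, List.find?_append, List.find?, h]

theorem pv_foldl_char (l : List String) (c d q r s : Option String) :
    l.foldl pvStepA
      (PySem.Dict.mk [("clock_port", c), ("d_port", d), ("q_port", q),
                      ("reset_port", r), ("set_port", s)]) =
    PySem.Dict.mk [("clock_port", (pvLastIn pvClockPorts l).or c),
                   ("d_port", (pvLastIn pvDPorts l).or d),
                   ("q_port", (pvLastIn pvQPorts l).or q),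
                   ("reset_port", (pvLastIn pvResetPorts l).or r),
                   ("set_port", (pvLastIn pvSetPorts l).or s)] := by
  induction l generalizing c d q r s with
  | nil => simp [pvLastIn]
  | cons n t ih =>
    rw [pv_last_cons, pv_last_cons, pv_last_cons, pv_last_cons, pv_last_cons]
    simp only [List.foldl_cons, pvStepA]
    by_cases h1 : n ∈ pvClockPorts
    · obtain ⟨hd, hq, hr, hs⟩ := pv_clock_disj n h1
      simp [h1, hd, hq, hr, hs, PySem.Dict.insert, ih]
    · by_cases h2 : n ∈ pvDPorts
      · obtain ⟨hq, hr, hs⟩ := pv_d_disj n h2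
        simp [h1, h2, hq, hr, hs, PySem.Dict.insert, ih]
      · by_cases h3 : n ∈ pvQPorts
        · obtain ⟨hr, hs⟩ := pv_q_disj n h3
          simp [h1, h2, h3, hr, hs, PySem.Dict.insert, ih]
        · by_cases h4 : n ∈ pvResetPorts
          · have hs := pv_r_disj n h4
            simp [h1, h2, h3, h4, hs, PySem.Dict.insert, ih]
          · by_cases h5 : n ∈ pvSetPorts
            · simp [h1, h2, h3, h4, h5, PySem.Dict.insert, ih]
            · simp [h1, h2, h3, h4, h5, ih]

-- ===== VERDICT (by name: the statement is the Claim_ definition above) =====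
theorem classify_ports_py_spec : Claim_equal_classify_ports_py := by
  intro ct l _
  unfold Spec_classify_ports_py classify_ports_py classify_ports_py_alt
  rw [pv_foldl_char]
  simp
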